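-- pv_equiv track=rewrite | github.com/ignajaja/coding-II | practica/practica_while.py | hay_cero
-- ===== SOURCE A (Python) =====
-- def hay_cero(num):
--     if num == 0:
--         return True
--     while num > 0:
--         if num % 10 == 0:
--             return True
--         num //= 10
--     return False
-- ===== SOURCE B (Python) =====
-- def hay_cero(num):
--     return '0' in str(num)
-- ===== Notes on version B (the rewrite author's own statement) =====
-- stated objective: idiomatic
-- what changed: Replaces the arithmetic digit-peeling loop with a single membership test on the decimal string representation.
-- intended difference: On negative inputs whose decimal digits include a zero (e.g. the witness -10), A returns False because its while-loop never runs on negatives, while B returns True; B's value is intended since such numbers do contain a zero digit. — e.g. on hay_cero(-10): A returns false, B returns true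
import Mathlib
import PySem

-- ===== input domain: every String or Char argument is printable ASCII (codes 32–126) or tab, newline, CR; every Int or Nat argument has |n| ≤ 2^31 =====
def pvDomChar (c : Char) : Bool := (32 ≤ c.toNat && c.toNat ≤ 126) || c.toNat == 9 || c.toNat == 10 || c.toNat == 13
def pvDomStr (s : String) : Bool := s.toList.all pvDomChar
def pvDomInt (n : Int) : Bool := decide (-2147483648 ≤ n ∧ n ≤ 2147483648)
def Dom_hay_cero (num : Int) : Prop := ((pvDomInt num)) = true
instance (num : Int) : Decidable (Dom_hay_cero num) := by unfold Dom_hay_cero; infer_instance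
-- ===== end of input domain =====

-- Port A peels decimal digits arithmetically; port B tests the decimal string representation (idiomatic rewrite);
-- B intentionally returns true on negatives that contain a zero digit, where A returns false (see D_ below).


-- ===== PORT A =====
-- the 'while num > 0' loop; fuel only makes the recursion structural (num.toNat + 1 steps always suffice)
def hayCeroLoop (fuel : Nat) (num : Int) : Bool :=
  match fuel with
  | 0 => false
  | f + 1 =>
    if 0 < num then
      if PySem.Int.mod num 10 == 0 then true
      else hayCeroLoop f (PySem.Int.floordiv num 10)
    else false

def hay_cero (num : Int) : Bool :=
  if num == 0 then true
  else hayCeroLoop (num.toNat + 1) num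

-- ===== PORT B =====
def hay_cero_alt (num : Int) : Bool :=
  PySem.Str.isIn "0" (PySem.Int.toStr num)

-- ===== PRECONDITION & SPEC =====
-- On negative numbers whose decimal digits include a zero, A returns false because its
-- while-loop never runs for negative input, while B returns true; B's value is intended since
-- such numbers do contain a zero digit.
def D_hay_cero (num : Int) : Prop := num < 0 ∧ 0 ∈ Nat.digits 10 num.natAbs
instance (num : Int) : Decidable (D_hay_cero num) := by unfold D_hay_cero; infer_instance

def Spec_hay_cero (num : Int) (out : Bool) : Prop := ¬ D_hay_cero num → out = hay_cero_alt num
instance (num : Int) (out : Bool) : Decidable (Spec_hay_cero num out) := by unfold Spec_hay_cero; infer_instance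

def pvDiffWitness_hay_cero : Int := (-10)
def pvDiffWitnessOut_hay_cero : Bool × Bool := (false, true)

-- ===== CLAIM (what is proved, stated in full; the proofs are below) =====
def Claim_unchanged_hay_cero : Prop := ∀ (num : Int), Dom_hay_cero num → Spec_hay_cero num (hay_cero num)
def Claim_changed_hay_cero : Prop := Dom_hay_cero (pvDiffWitness_hay_cero) ∧ D_hay_cero (pvDiffWitness_hay_cero) ∧ hay_cero (pvDiffWitness_hay_cero) = pvDiffWitnessOut_hay_cero.1 ∧ hay_cero_alt (pvDiffWitness_hay_cero) = pvDiffWitnessOut_hay_cero.2 ∧ pvDiffWitnessOut_hay_cero.1 ≠ pvDiffWitnessOut_hay_cero.2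
def Claim_exact_hay_cero : Prop := ∀ (num : Int), Dom_hay_cero num → D_hay_cero num → hay_cero num ≠ hay_cero_alt num

-- ===== LEMMAS AND PROOFS =====

-- A's loop on a positive number computes exactly "0 occurs among the decimal digits"
theorem hayCeroLoop_eq_digits (fuel : Nat) : ∀ (n : Nat), n < fuel →
    hayCeroLoop fuel (n : Int) = decide (0 ∈ Nat.digits 10 n) := by
  induction fuel with
  | zero => intro n h; omega
  | succ f ih =>
    intro n h
    by_cases hn : 0 < n
    · have hmod : PySem.Int.mod (n : Int) 10 = ((n % 10 : Nat) : Int) := PySem.Int.mod_natCast n 10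
      have hdiv : PySem.Int.floordiv (n : Int) 10 = ((n / 10 : Nat) : Int) := PySem.Int.floordiv_natCast n 10
      have hrec := ih (n / 10) (by omega)
      rw [Nat.digits_def' (by norm_num : 1 < 10) hn]
      simp only [hayCeroLoop, hmod, hdiv, hrec]
      rw [if_pos (by exact_mod_cast hn)]
      by_cases h0 : n % 10 = 0
      · simp [h0]
      · simp [Ne.symm h0]
        intro hdvd
        exfalso
        omega
    · have hn0 : n = 0 := by omega
      subst hn0; simp [hayCeroLoop]

-- Nat.toDigitsCore writes the digits of a positive number (reversed, as characters) in front of the accumulator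
theorem toDigitsCore_eq (fuel : Nat) : ∀ (n : Nat) (l : List Char), 0 < n → n < fuel →
    Nat.toDigitsCore 10 fuel n l = ((Nat.digits 10 n).map Nat.digitChar).reverse ++ l := by
  induction fuel with
  | zero => intro n l h hf; omega
  | succ f ih =>
    intro n l hn hf
    rw [Nat.digits_def' (by norm_num : 1 < 10) hn]
    by_cases hd : n / 10 = 0
    · have : Nat.digits 10 (n / 10) = [] := by rw [hd]; simp
      simp [Nat.toDigitsCore, hd]
    · have h10 : 10 ≤ n := by omega
      rw [show Nat.toDigitsCore 10 (f + 1) n l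
            = Nat.toDigitsCore 10 f (n / 10) (Nat.digitChar (n % 10) :: l) from by
          simp [Nat.toDigitsCore, hd]]
      rw [ih (n / 10) _ (by omega) (by omega)]
      simp

-- '0' occurs in str(n) (n positive) iff 0 is a decimal digit of n
theorem zeroChar_mem_toDigits (n : Nat) (hn : 0 < n) :
    ('0' ∈ Nat.toDigits 10 n) ↔ 0 ∈ Nat.digits 10 n := by
  unfold Nat.toDigits
  rw [toDigitsCore_eq (n + 1) n [] hn (by omega)]
  simp only [List.append_nil, List.mem_reverse, List.mem_map]
  constructor
  · rintro ⟨d, hd, hc⟩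
    have hlt : d < 10 := Nat.digits_lt_base (by norm_num) hd
    interval_cases d <;> simp_all [Nat.digitChar]
  · intro h0; exact ⟨0, h0, rfl⟩

-- B on any number n: true iff '0' is among the characters of str(n)
theorem alt_iff (num : Int) : hay_cero_alt num = true ↔ '0' ∈ PySem.Int.toChars num := by
  unfold hay_cero_alt
  rw [PySem.Str.isIn_iff_infix, ← PySem.Int.toList_toStr]
  constructor
  · intro h
    rcases h with ⟨pre, suf, hps⟩
    have : '0' ∈ pre ++ "0".toList ++ suf := by simp
    rw [hps] at this; simpa using this
  · intro h
    rcases List.mem_iff_append.mp h with ⟨pre, suf, hps⟩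
    exact ⟨pre, suf, by simpa using hps.symm⟩

theorem alt_pos (n : Nat) (hn : 0 < n) :
    hay_cero_alt (n : Int) = decide (0 ∈ Nat.digits 10 n) := by
  by_cases h : 0 ∈ Nat.digits 10 n
  · have : hay_cero_alt (n : Int) = true := by
      rw [alt_iff]
      simp only [PySem.Int.toChars]
      rw [if_neg (by omega)]
      simpa [Int.toNat_natCast] using (zeroChar_mem_toDigits n hn).mpr h
    simp [this, h]
  · have : ¬ ('0' ∈ PySem.Int.toChars (n : Int)) := by
      simp only [PySem.Int.toChars]
      rw [if_neg (by omega)]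
      simpa [Int.toNat_natCast] using fun hc => h ((zeroChar_mem_toDigits n hn).mp hc)
    simp [h]
    rw [Bool.eq_false_iff]
    intro hc; exact this ((alt_iff _).mp hc)

theorem alt_neg (num : Int) (hneg : num < 0) :
    hay_cero_alt num = decide (0 ∈ Nat.digits 10 num.natAbs) := by
  have hpos : 0 < num.natAbs := by omega
  have hchars : PySem.Int.toChars num = '-' :: Nat.toDigits 10 num.natAbs := by
    simp [PySem.Int.toChars, hneg]
  by_cases h : 0 ∈ Nat.digits 10 num.natAbs
  · have : hay_cero_alt num = true := by
      rw [alt_iff, hchars]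
      exact List.mem_cons_of_mem _ ((zeroChar_mem_toDigits _ hpos).mpr h)
    simp [this, h]
  · simp [h]
    rw [Bool.eq_false_iff]
    intro hc
    have := (alt_iff _).mp hc
    rw [hchars, List.mem_cons] at this
    rcases this with h1 | h2
    · exact absurd h1 (by decide)
    · exact h ((zeroChar_mem_toDigits _ hpos).mp h2)

-- ===== VERDICT (by name: the statement is the Claim_ definition above) =====
theorem hay_cero_spec : Claim_unchanged_hay_cero := by
  intro num _ hD
  rcases lt_trichotomy num 0 with hneg | hzero | hpos
  · -- negative, and (by ¬D) no zero digit
    have hnod : ¬ 0 ∈ Nat.digits 10 num.natAbs := fun h => hD ⟨hneg, h⟩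
    have hA : hay_cero num = false := by
      unfold hay_cero
      rw [if_neg (by simp; omega)]
      simp [hayCeroLoop]
      omega
    rw [hA, alt_neg num hneg]
    simp [hnod]
  · subst hzero
    decide
  · have hn : num = ((num.toNat : Nat) : Int) := by omega
    have hpos' : 0 < num.toNat := by omega
    have hA : hay_cero num = hayCeroLoop (num.toNat + 1) num := by
      unfold hay_cero; rw [if_neg (by simp; omega)]
    rw [hA, hn, Int.toNat_natCast,
        hayCeroLoop_eq_digits (num.toNat + 1) num.toNat (by omega), alt_pos num.toNat hpos']

theorem hay_cero_changed : Claim_changed_hay_cero := by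
  unfold Claim_changed_hay_cero; decide

theorem hay_cero_tight : Claim_exact_hay_cero := by
  intro num _ hd
  rcases hd with ⟨hneg, hz⟩
  have hA : hay_cero num = false := by
    unfold hay_cero
    rw [if_neg (by simp; omega)]
    simp [hayCeroLoop]
    omega
  have hB : hay_cero_alt num = true := by
    rw [alt_neg num hneg]; simp [hz]
  rw [hA, hB]; decide
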